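-- pv_equiv track=rewrite | github.com/joshuaburkhart/BioinformaticsAlgorithms | hw1/src/lib/FastaManipulation.py | find_put_clev_sites
-- ===== SOURCE A (Python) =====
-- def basic_prot(prot):
--     if prot in "RKH":
--         return True
--     return False
--
-- def find_put_clev_sites(in_prot_seq_str):
--     loc = []
--     for i, e in enumerate(in_prot_seq_str):
--         if i < len(in_prot_seq_str) - 1:  # IOB
--             if basic_prot(e) and basic_prot(in_prot_seq_str[i + 1]):
--                 loc.append(i)
--         else:
--             break  # obvi done
--     return loc
-- ===== SOURCE B (Python) =====
-- def find_put_clev_sites(in_prot_seq_str):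
--     loc = []
--     run = 0  # length of the current run of consecutive basic residues
--     for i, c in enumerate(in_prot_seq_str):
--         if c in "RKH":
--             run += 1
--             if run >= 2:
--                 loc.append(i - 1)
--         else:
--             run = 0
--     return loc
-- ===== Notes on version B (the rewrite author's own statement) =====
-- stated objective: alternative
-- what changed: B replaces A's lookahead test (peeking at seq[i+1] under a length guard) by a run-length scan: it maintains the length of the current run of consecutive basic residues and emits i-1 whenever the run reaches 2, so no indexing ahead and no per-iteration length comparison are needed.
import Mathlib
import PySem

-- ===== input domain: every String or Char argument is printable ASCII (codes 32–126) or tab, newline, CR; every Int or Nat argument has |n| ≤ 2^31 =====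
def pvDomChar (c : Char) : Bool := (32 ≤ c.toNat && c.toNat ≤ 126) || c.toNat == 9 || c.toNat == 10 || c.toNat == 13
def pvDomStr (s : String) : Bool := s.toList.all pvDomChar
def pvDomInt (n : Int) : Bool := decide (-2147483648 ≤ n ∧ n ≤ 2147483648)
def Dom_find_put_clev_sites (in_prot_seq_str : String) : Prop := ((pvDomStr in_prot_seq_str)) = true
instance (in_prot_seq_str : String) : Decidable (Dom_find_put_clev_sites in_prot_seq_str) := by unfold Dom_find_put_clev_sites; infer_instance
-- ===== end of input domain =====

-- B replaces A's lookahead at seq[i+1] by a single run-length scan; same asymptotic cost (objective: alternative).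

-- ===== PORT A =====
-- basic_prot: `prot in "RKH"` on a single character = membership
def basicProt (c : Char) : Bool := c = 'R' || c = 'K' || c = 'H'

-- the for-loop over enumerate(s); `break` on the last index returns the
-- accumulated-so-far list, i.e. ends the recursion with [].
-- s[i+1] is in range under the guard i < n - 1, so `.getD ' '` is exact there.
def loopA (cs : List Char) (n : Int) : Nat → List Char → List Int
  | _, [] => []
  | i, e :: rest =>
    if (i : Int) < n - 1 then
      if basicProt e && basicProt ((PySem.List.pyGet? cs ((i : Int) + 1)).getD ' ') then
        (i : Int) :: loopA cs n (i + 1) rest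
      else
        loopA cs n (i + 1) rest
    else []  -- break

def find_put_clev_sites (in_prot_seq_str : String) : List Int :=
  let cs := in_prot_seq_str.toList
  loopA cs (cs.length : Int) 0 cs

-- ===== PORT B =====
-- single scan maintaining `run` = length of the current run of basic residues
def loopB : Nat → Nat → List Char → List Int
  | _, _, [] => []
  | i, run, c :: rest =>
    if basicProt c then
      if run + 1 ≥ 2 then ((i : Int) - 1) :: loopB (i + 1) (run + 1) rest
      else loopB (i + 1) (run + 1) rest
    else loopB (i + 1) 0 rest

def find_put_clev_sites_alt (in_prot_seq_str : String) : List Int :=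
  loopB 0 0 in_prot_seq_str.toList

-- ===== PRECONDITION & SPEC =====
def Spec_find_put_clev_sites (in_prot_seq_str : String) (out : List Int) : Prop := out = find_put_clev_sites_alt in_prot_seq_str
instance (in_prot_seq_str : String) (out : List Int) : Decidable (Spec_find_put_clev_sites in_prot_seq_str out) := by unfold Spec_find_put_clev_sites; infer_instance

-- ===== CLAIM (what is proved, stated in full; the proofs are below) =====
def Claim_equal_find_put_clev_sites : Prop := ∀ (in_prot_seq_str : String), Dom_find_put_clev_sites in_prot_seq_str → Spec_find_put_clev_sites in_prot_seq_str (find_put_clev_sites in_prot_seq_str)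

-- ===== LEMMAS AND PROOFS =====

-- reference spec: adjacent-pair scan, no lookup, no counter
def pairSpec : Nat → List Char → List Int
  | _, [] => []
  | _, [_] => []
  | i, a :: b :: rest =>
    (if basicProt a && basicProt b then [(i : Int)] else []) ++ pairSpec (i + 1) (b :: rest)

def headBasic : List Char → Bool
  | [] => false
  | c :: _ => basicProt c

-- A's loop on the suffix `l = cs.drop i` equals the pair scan on that suffix
theorem loopA_eq_pairSpec (cs : List Char) :
    ∀ (l : List Char) (i : Nat), cs.drop i = l →
      loopA cs (cs.length : Int) i l = pairSpec i l := by
  intro l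
  induction l with
  | nil => intro i _; rfl
  | cons c rest ih =>
    intro i h
    have hi : cs.length = i + (c :: rest).length := by
      have := List.length_drop (l := cs) (i := i)
      rw [h] at this
      have hile : i ≤ cs.length := by
        by_contra hlt
        rw [Nat.not_le] at hlt
        have : cs.drop i = [] := List.drop_eq_nil_of_le (le_of_lt hlt)
        rw [h] at this; simp at this
      omega
    cases rest with
    | nil =>
      -- last element: guard i < n - 1 fails, loop breaks
      have hguard : ¬ ((i : Int) < (cs.length : Int) - 1) := by
        simp at hi; omega
      simp [loopA, hguard, pairSpec]
    | cons d rest' =>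
      have hguard : (i : Int) < (cs.length : Int) - 1 := by
        simp at hi; omega
      have hrec : cs.drop (i + 1) = d :: rest' := by
        have := congrArg (List.drop 1) h
        simpa [List.drop_drop, Nat.add_comm] using this
      have hget : cs[i + 1]? = some d := by
        rw [← List.getElem?_drop, h]; rfl
      have hnext : PySem.List.pyGet? cs ((i : Int) + 1) = some d := by
        have h1 : (0 : Int) ≤ (i : Int) + 1 := by omega
        have h2 : ((i : Int) + 1) < (cs.length : Int) := by omega
        have h3 : ((i : Int) + 1).toNat = i + 1 := by omega
        simp [PySem.List.pyGet?, PySem.List.pyIdx?, h1, h2, h3, hget]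
      have step :
          loopA cs (cs.length : Int) i (c :: d :: rest') =
            (if (i : Int) < (cs.length : Int) - 1 then
              if basicProt c && basicProt ((PySem.List.pyGet? cs ((i : Int) + 1)).getD ' ') then
                (i : Int) :: loopA cs (cs.length : Int) (i + 1) (d :: rest')
              else loopA cs (cs.length : Int) (i + 1) (d :: rest')
            else []) := rfl
      rw [step, if_pos hguard, hnext]
      rw [ih (i + 1) hrec]
      by_cases hb : (basicProt c && basicProt d) = true
      · simp [pairSpec, hb]
      · simp [pairSpec, hb]

-- B's loop equals a leading emission (when the previous char was basic and the
-- head is basic) followed by the pair scan; `run` only matters through `1 ≤ run`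
theorem loopB_eq_pairSpec :
    ∀ (l : List Char) (i run : Nat),
      loopB i run l =
        (if 1 ≤ run ∧ headBasic l then [(i : Int) - 1] else []) ++ pairSpec i l := by
  intro l
  induction l with
  | nil => intro i run; simp [loopB, headBasic, pairSpec]
  | cons c rest ih =>
    intro i run
    have step :
        loopB i run (c :: rest) =
          (if basicProt c then
            (if run + 1 ≥ 2 then ((i : Int) - 1) :: loopB (i + 1) (run + 1) rest
             else loopB (i + 1) (run + 1) rest)
          else loopB (i + 1) 0 rest) := rfl
    rw [step]
    by_cases hb : basicProt c = true
    · rw [if_pos hb, ih (i + 1) (run + 1)]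
      cases rest with
      | nil =>
        by_cases hr : run + 1 ≥ 2
        · have hrge : 1 ≤ run := by omega
          simp [hr, hrge, headBasic, hb, pairSpec]
        · have hrun0 : run = 0 := by omega
          simp [hrun0, headBasic, hb, pairSpec]
      | cons d rest' =>
        have hps : pairSpec i (c :: d :: rest') =
            (if basicProt c && basicProt d then [(i : Int)] else []) ++ pairSpec (i + 1) (d :: rest') := rfl
        rw [hps]
        by_cases hd : basicProt d = true
        · have hcast : ((i : Int) + 1) - 1 = (i : Int) := by omega
          by_cases hr : run + 1 ≥ 2
          · have hrge : 1 ≤ run := by omega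
            simp [hr, hrge, headBasic, hb, hd, hcast]
          · have hrun0 : run = 0 := by omega
            simp [hrun0, headBasic, hb, hd, hcast]
        · by_cases hr : run + 1 ≥ 2
          · have hrge : 1 ≤ run := by omega
            simp [hr, hrge, headBasic, hb, hd]
          · have hrun0 : run = 0 := by omega
            simp [hrun0, headBasic, hb, hd]
    · simp only [hb, if_neg, Bool.false_eq_true, not_false_eq_true]
      rw [ih (i + 1) 0]
      cases rest with
      | nil => simp [headBasic, hb, pairSpec]
      | cons d rest' =>
        have hps : pairSpec i (c :: d :: rest') =
            (if basicProt c && basicProt d then [(i : Int)] else []) ++ pairSpec (i + 1) (d :: rest') := rfl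
        rw [hps]
        simp [headBasic, hb]

-- ===== VERDICT (by name: the statement is the Claim_ definition above) =====
theorem find_put_clev_sites_spec : Claim_equal_find_put_clev_sites := by
  intro s _
  unfold Spec_find_put_clev_sites find_put_clev_sites find_put_clev_sites_alt
  rw [loopA_eq_pairSpec s.toList s.toList 0 (by simp), loopB_eq_pairSpec]
  simp
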